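-- pv_equiv track=rewrite | github.com/alexandraback/datacollection | solutions_5636311922769920_1/Python/Nin0/d2.py | determine_col
-- ===== SOURCE A (Python) =====
-- def determine_col(rows, K, C):
--     """
--     Determine the column number where all rows are 'G's.
--     """
--     rows = [x - 1 for x in rows]  # Change to 0-based indices.
--     # We look for a base K number with C digits such that all
--     # elements of rows appear as digits this number.
--     num = 0
--     for d in rows:
--         num *= K
--         num += d
--     assert 0 <= num < K**C
--     return num + 1  # Back to 1-based counting.
-- ===== SOURCE B (Python) =====
-- def determine_col(rows, K, C):
--     """
--     Determine the column number where all rows are 'G's.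
--     """
--     n = len(rows)
--     num = sum((rows[i] - 1) * K ** (n - 1 - i) for i in range(n))
--     assert 0 <= num < K ** C
--     return num + 1
-- ===== Notes on version B (the rewrite author's own statement) =====
-- stated objective: alternative
-- what changed: Replaces Horner's running accumulator (num = num*K + d per digit) with an explicit positional sum of (rows[i]-1)*K**(n-1-i) over the indices.
-- outside the precondition, e.g. on determine_col([1], 2, -1): A returns 1, B returns 1
import Mathlib
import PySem

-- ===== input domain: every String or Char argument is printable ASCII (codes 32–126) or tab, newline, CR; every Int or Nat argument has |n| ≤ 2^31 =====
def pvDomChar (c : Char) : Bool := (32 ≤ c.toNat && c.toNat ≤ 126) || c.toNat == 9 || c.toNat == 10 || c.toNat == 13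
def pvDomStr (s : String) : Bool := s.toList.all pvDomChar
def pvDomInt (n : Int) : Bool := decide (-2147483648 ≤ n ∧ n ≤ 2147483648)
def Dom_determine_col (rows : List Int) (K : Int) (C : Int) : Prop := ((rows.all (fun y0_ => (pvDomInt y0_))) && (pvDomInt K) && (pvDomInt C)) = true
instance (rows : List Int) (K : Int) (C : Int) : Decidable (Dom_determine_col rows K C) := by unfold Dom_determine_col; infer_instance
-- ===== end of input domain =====

-- B replaces Horner's running accumulator with an explicit positional sum of digit*K^place (alternative decomposition, same cost).

-- ===== PORT A =====
def determine_col (rows : List Int) (K : Int) (C : Int) : Int :=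
  -- rows = [x - 1 for x in rows]
  let rows1 := rows.map (fun x => x - 1)
  -- num = 0; for d in rows: num *= K; num += d
  let num := rows1.foldl (fun num d => num * K + d) 0
  -- assert 0 <= num < K**C  (AssertionError, and float K**C for C < 0: excluded by Pre_)
  num + 1

-- ===== PORT B =====
def determine_col_alt (rows : List Int) (K : Int) (C : Int) : Int :=
  let n := rows.length
  -- num = sum((rows[i] - 1) * K ** (n - 1 - i) for i in range(n))
  let num := ((List.range n).map (fun i => (rows.getD i 0 - 1) * K ^ (n - 1 - i))).sum
  -- assert 0 <= num < K ** C  (excluded by Pre_, as in A)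
  num + 1

-- ===== PRECONDITION & SPEC =====
-- closed-form value of the base-K positional number (the quantity Python's assert tests)
def pvVal_determine_col (rows : List Int) (K : Int) : Int :=
  ((List.range rows.length).map (fun i => (rows.getD i 0 - 1) * K ^ (rows.length - 1 - i))).sum

-- Pre_ excludes (a) inputs where Python's `assert 0 <= num < K**C` fails (AssertionError in A and B),
-- and (b) C < 0, where Python's K**C is a float: A can still return there in degenerate cases
-- (e.g. ([1], 2, -1), where both A and B return 1), but the comparison leaves the Int domain.
-- `0 ≤ num ∧ num < K^C` is stated via Nat.log so it is cheap to decide for large C: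
-- for K ≥ 2 (resp. K ≤ -2 with C even), num < K^C ↔ num = 0 ∨ log_|K| num < C.
def Pre_determine_col (rows : List Int) (K : Int) (C : Int) : Prop :=
  0 ≤ C ∧ 0 ≤ pvVal_determine_col rows K ∧
  (if 2 ≤ K then
    (pvVal_determine_col rows K = 0 ∨ Nat.log K.toNat (pvVal_determine_col rows K).toNat < C.toNat)
  else if K = 1 then pvVal_determine_col rows K = 0
  else if K = 0 then C = 0 ∧ pvVal_determine_col rows K = 0
  else if K = -1 then C % 2 = 0 ∧ pvVal_determine_col rows K = 0
  else
    C % 2 = 0 ∧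
      (pvVal_determine_col rows K = 0 ∨ Nat.log (-K).toNat (pvVal_determine_col rows K).toNat < C.toNat))
instance (rows : List Int) (K : Int) (C : Int) : Decidable (Pre_determine_col rows K C) := by
  unfold Pre_determine_col; infer_instance

def pvWitness_determine_col : List Int × Int × Int := ([2, 1, 3], 3, 3)

def Spec_determine_col (rows : List Int) (K : Int) (C : Int) (out : Int) : Prop := out = determine_col_alt rows K C
instance (rows : List Int) (K : Int) (C : Int) (out : Int) : Decidable (Spec_determine_col rows K C out) := by unfold Spec_determine_col; infer_instance

-- ===== CLAIM (what is proved, stated in full; the proofs are below) =====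
def Claim_equal_determine_col : Prop := ∀ (rows : List Int) (K : Int) (C : Int), Dom_determine_col rows K C → Pre_determine_col rows K C → Spec_determine_col rows K C (determine_col rows K C)

-- ===== LEMMAS AND PROOFS =====

-- Horner's evaluation equals the positional sum.
lemma horner_eq_positional (K : Int) (l : List Int) :
    l.foldl (fun num d => num * K + d) 0 =
      ((List.range l.length).map (fun i => l.getD i 0 * K ^ (l.length - 1 - i))).sum := by
  induction l using List.reverseRecOn with
  | nil => simp
  | append_singleton l d ih =>
    rw [List.foldl_append, List.foldl_cons, List.foldl_nil, ih]
    rw [List.length_append, List.length_singleton, List.range_succ, List.map_append,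
      List.sum_append]
    have h1 : ((List.range l.length).map
        (fun i => (l ++ [d]).getD i 0 * K ^ (l.length + 1 - 1 - i))).sum =
        ((List.range l.length).map
        (fun i => l.getD i 0 * K ^ (l.length - 1 - i) * K)).sum := by
      refine congrArg List.sum (List.map_congr_left ?_)
      intro i hi
      rw [List.mem_range] at hi
      rw [List.getD_append _ _ _ _ hi]
      have he : l.length + 1 - 1 - i = (l.length - 1 - i) + 1 := by omega
      rw [he, pow_succ]; ring
    rw [h1, ← List.sum_map_mul_right]
    simp [List.getD_eq_getElem?_getD]

lemma determine_col_eq (rows : List Int) (K : Int) (C : Int) :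
    determine_col rows K C = determine_col_alt rows K C := by
  unfold determine_col determine_col_alt
  dsimp only
  have h := horner_eq_positional K (rows.map (fun x => x - 1))
  simp only [List.length_map] at h
  rw [h]
  refine congrArg (· + 1) (congrArg List.sum (List.map_congr_left ?_))
  intro i hi
  rw [List.mem_range] at hi
  rw [List.getD_eq_getElem?_getD, List.getElem?_map,
    List.getElem?_eq_getElem hi]
  simp [List.getD_eq_getElem?_getD, List.getElem?_eq_getElem hi]

-- ===== VERDICT (by name: the statement is the Claim_ definition above) =====
theorem determine_col_spec : Claim_equal_determine_col := by
  intro rows K C _ _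
  unfold Spec_determine_col
  exact determine_col_eq rows K C
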